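-- pv_equiv track=rewrite | github.com/honu-shell-utions/python | sandbox/project_euler/201-250/242_odd_triplets01.py | f
-- ===== SOURCE A (Python) =====
-- from itertools import combinations
--
-- def f(n, k):
--     counter = 0
--     t_lst = [x for x in range(1,n + 1)]
--     for ss in combinations(t_lst, k):
--         if sum(ss) % 2 != 0:
--             counter += 1
--     if counter % 2 != 0:
--         return counter
--     return 0
-- ===== SOURCE B (Python) =====
-- def f(n, k):
--     # dp[j] = (#even-sum j-subsets, #odd-sum j-subsets) of the prefix 1..x processed so far
--     if k < 0 or k > n:
--         return 0
--     dp = [(1, 0)]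
--     for x in range(1, n + 1):
--         prev = dp if x % 2 == 0 else [(o, e) for (e, o) in dp]
--         ext = dp + [(0, 0)] if len(dp) <= k else dp
--         dp = [ext[0]] + [(e + pe, o + po) for ((e, o), (pe, po)) in zip(ext[1:], prev)]
--     total = dp[k][1] if k < len(dp) else 0
--     return total if total % 2 != 0 else 0
-- ===== Notes on version B (the rewrite author's own statement) =====
-- stated objective: alternative
-- what changed: A enumerates all C(n,k) k-combinations of 1..n and counts the odd-sum ones; B computes the same count with a dynamic-programming table over 1..n indexed by subset size and sum parity, never enumerating subsets (with an early 0 for k>n or k<0).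
import Mathlib
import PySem

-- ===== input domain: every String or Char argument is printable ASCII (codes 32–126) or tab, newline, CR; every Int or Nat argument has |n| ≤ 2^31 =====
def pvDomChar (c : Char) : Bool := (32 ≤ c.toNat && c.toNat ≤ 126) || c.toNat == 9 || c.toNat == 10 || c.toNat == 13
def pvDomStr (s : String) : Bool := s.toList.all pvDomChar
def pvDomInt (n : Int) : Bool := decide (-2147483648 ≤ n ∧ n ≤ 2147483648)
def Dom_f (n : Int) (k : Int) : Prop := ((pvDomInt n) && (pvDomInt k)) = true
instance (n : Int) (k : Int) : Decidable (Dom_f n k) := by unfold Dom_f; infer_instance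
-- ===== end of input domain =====

-- B replaces A's enumeration of all k-combinations by a size×parity dynamic-programming
-- table over 1..n (objective: alternative algorithm; equal return values, no speed claim).

-- ===== PORT A =====
-- itertools.combinations(l, j): all j-element sublists of l (order preserved)
def pvCombos : Nat → List Int → List (List Int)
  | 0, _ => [[]]
  | _ + 1, [] => []
  | j + 1, x :: xs => (pvCombos j xs).map (fun ss => x :: ss) ++ pvCombos (j + 1) xs

-- itertools.combinations returns an empty iterator at once when r > len(pool)
def pvCombinations (j : Nat) (xs : List Int) : List (List Int) :=
  if xs.length < j then [] else pvCombos j xs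

def f (n : Int) (k : Int) : Int :=
  let t_lst := PySem.List.pyRange 1 (n + 1) 1
  let counter :=
    (pvCombinations k.toNat t_lst).foldl
      (fun c ss => if PySem.Int.mod ss.sum 2 ≠ 0 then c + 1 else c) (0 : Int)
  if PySem.Int.mod counter 2 ≠ 0 then counter else 0

-- ===== PORT B =====
-- one DP step for element x: dp[j] = (#even-sum j-subsets, #odd-sum j-subsets) of the prefix
def pvStep (k : Int) (dp : List (Int × Int)) (x : Int) : List (Int × Int) :=
  let prev := if PySem.Int.mod x 2 = 0 then dp else dp.map (fun p => (p.2, p.1))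
  let ext := if (dp.length : Int) ≤ k then dp ++ [(0, 0)] else dp
  ext.take 1 ++ List.zipWith (fun p q => (p.1 + q.1, p.2 + q.2)) (ext.drop 1) prev

def f_alt (n : Int) (k : Int) : Int :=
  if k < 0 ∨ n < k then 0
  else
    let dp := (PySem.List.pyRange 1 (n + 1) 1).foldl (pvStep k) [((1 : Int), (0 : Int))]
    let total := if (k : Int) < dp.length then (dp.getD k.toNat (0, 0)).2 else 0
    if PySem.Int.mod total 2 ≠ 0 then total else 0

-- ===== PRECONDITION & SPEC =====
-- Pre_ excludes k < 0, where itertools.combinations makes A raise ValueError.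
def Pre_f (n : Int) (k : Int) : Prop := 0 ≤ k
instance (n : Int) (k : Int) : Decidable (Pre_f n k) := by unfold Pre_f; infer_instance
def pvWitness_f : Int × Int := (6, 3)

def Spec_f (n : Int) (k : Int) (out : Int) : Prop := out = f_alt n k
instance (n : Int) (k : Int) (out : Int) : Decidable (Spec_f n k out) := by unfold Spec_f; infer_instance

-- ===== CLAIM (what is proved, stated in full; the proofs are below) =====
def Claim_equal_f : Prop := ∀ (n : Int) (k : Int), Dom_f n k → Pre_f n k → Spec_f n k (f n k)

-- ===== LEMMAS AND PROOFS =====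

-- parity of an integer sum, as A tests it
def pvPar (s : Int) : Bool := decide (PySem.Int.mod s 2 ≠ 0)

-- number of j-subsets of l whose sum has parity b
def pvCnt (l : List Int) (j : Nat) (b : Bool) : Nat :=
  (pvCombos j l).countP (fun ss => pvPar ss.sum == b)

lemma pvPar_add (x s : Int) : pvPar (x + s) = xor (pvPar x) (pvPar s) := by
  simp only [pvPar, PySem.Int.mod_eq_emod_of_pos (by norm_num : (0:Int) < 2)]
  rcases Int.emod_two_eq x with hx | hx <;> rcases Int.emod_two_eq s with hs | hs <;>
    simp [Int.add_emod, hx, hs]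

lemma pvCnt_zero (l : List Int) (b : Bool) : pvCnt l 0 b = if b then 0 else 1 := by
  cases b <;> simp [pvCnt, pvCombos, pvPar, PySem.Int.mod]

lemma pvCnt_nil (j : Nat) (b : Bool) : pvCnt [] (j + 1) b = 0 := by
  simp [pvCnt, pvCombos]

lemma pvCombos_eq_nil (l : List Int) : ∀ j : Nat, l.length < j → pvCombos j l = [] := by
  induction l with
  | nil => intro j hj; cases j with
    | zero => exact absurd hj (by omega)
    | succ j => rfl
  | cons x xs ih =>
      intro j hj
      cases j with
      | zero => omega
      | succ j =>
          simp only [pvCombos]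
          rw [ih j (by simp at hj; omega), ih (j+1) (by simp at hj; omega)]
          simp

lemma pvCombinations_eq (j : Nat) (xs : List Int) : pvCombinations j xs = pvCombos j xs := by
  unfold pvCombinations
  by_cases h : xs.length < j
  · rw [if_pos h, pvCombos_eq_nil xs j h]
  · rw [if_neg h]

lemma pvCnt_of_len_lt (l : List Int) (j : Nat) (b : Bool) (h : l.length < j) :
    pvCnt l j b = 0 := by
  simp [pvCnt, pvCombos_eq_nil l j h]

lemma pvCnt_cons (x : Int) (l : List Int) (j : Nat) (b : Bool) :
    pvCnt (x :: l) (j + 1) b = pvCnt l j (xor (pvPar x) b) + pvCnt l (j + 1) b := by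
  have hp : (fun ss : List Int => pvPar (x :: ss).sum == b)
      = (fun ss : List Int => pvPar ss.sum == xor (pvPar x) b) := by
    funext ss
    simp only [List.sum_cons, pvPar_add]
    cases pvPar x <;> cases pvPar ss.sum <;> cases b <;> rfl
  simp only [pvCnt, pvCombos, List.countP_append, List.countP_map]
  rw [show ((fun ss : List Int => pvPar ss.sum == b) ∘ fun ss => x :: ss)
        = (fun ss : List Int => pvPar (x :: ss).sum == b) from rfl, hp]

lemma pvCnt_snoc_zero (x : Int) (l : List Int) (b : Bool) :
    pvCnt (l ++ [x]) 0 b = pvCnt l 0 b := by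
  rw [pvCnt_zero, pvCnt_zero]

lemma pvCnt_snoc (x : Int) : ∀ (l : List Int) (j : Nat) (b : Bool),
    pvCnt (l ++ [x]) (j + 1) b = pvCnt l (j + 1) b + pvCnt l j (xor (pvPar x) b) := by
  intro l
  induction l with
  | nil =>
      intro j b
      simp only [List.nil_append]
      rw [pvCnt_cons, pvCnt_nil]
      omega
  | cons y l ih =>
      intro j b
      rw [List.cons_append, pvCnt_cons, pvCnt_cons]
      cases j with
      | zero =>
          rw [ih 0]
          have h1 : pvCnt (y :: l) 0 (xor (pvPar x) b) = pvCnt l 0 (xor (pvPar x) b) := by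
            rw [pvCnt_zero, pvCnt_zero]
          rw [h1, pvCnt_snoc_zero]
          simp only [Nat.zero_add]
          omega
      | succ j =>
          rw [ih j, ih (j + 1), pvCnt_cons]
          have : xor (pvPar y) (xor (pvPar x) b) = xor (pvPar x) (xor (pvPar y) b) := by
            cases pvPar x <;> cases pvPar y <;> cases b <;> rfl
          rw [this]; omega

-- the DP table B maintains, expressed through A's counts
def pvTbl (k : Nat) (l : List Int) : List (Int × Int) :=
  (List.range (min (l.length + 1) (k + 1))).map
    (fun j => ((pvCnt l j false : Int), (pvCnt l j true : Int)))

lemma pvTbl_len (k : Nat) (l : List Int) :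
    (pvTbl k l).length = min (l.length + 1) (k + 1) := by
  simp [pvTbl]

lemma pvZipWith_map_range {α β γ : Type} (h : α → β → γ) (u : Nat → α) (v : Nat → β)
    (a b : Nat) :
    List.zipWith h ((List.range a).map u) ((List.range b).map v)
      = (List.range (min a b)).map (fun j => h (u j) (v j)) := by
  apply List.ext_getElem
  · simp
  · intro j h1 h2
    simp [List.getElem_zipWith]

lemma pvStep_tbl (k : Nat) (l : List Int) (x : Int) :
    pvStep (k : Int) (pvTbl k l) x = pvTbl k (l ++ [x]) := by
  set px := pvPar x with hpx
  set M := min (l.length + 1) (k + 1) with hM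
  set fj : Nat → Int × Int :=
    fun j => ((pvCnt l j false : Int), (pvCnt l j true : Int)) with hf
  set Fj : Nat → Int × Int :=
    fun j => ((pvCnt (l ++ [x]) j false : Int), (pvCnt (l ++ [x]) j true : Int)) with hF
  have htbl : pvTbl k l = (List.range M).map fj := rfl
  have hprev : (if PySem.Int.mod x 2 = 0 then pvTbl k l
      else (pvTbl k l).map (fun p => (p.2, p.1)))
      = (List.range M).map
          (fun j => ((pvCnt l j (xor px false) : Int), (pvCnt l j (xor px true) : Int))) := by
    by_cases hx : PySem.Int.mod x 2 = 0
    · have hp : px = false := by rw [hpx]; unfold pvPar; rw [hx]; decide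
      rw [if_pos hx, hp, htbl]; rfl
    · have hp : px = true := by rw [hpx]; unfold pvPar; exact decide_eq_true hx
      rw [if_neg hx, hp, htbl, List.map_map]; rfl
  set M' := min (l.length + 2) (k + 1) with hM'
  have hext : (if (((pvTbl k l).length : Int) ≤ (k : Int))
        then pvTbl k l ++ [((0 : Int), (0 : Int))] else pvTbl k l)
      = (List.range M').map fj := by
    rw [pvTbl_len]
    by_cases hlk : l.length < k
    · rw [if_pos (by push_cast; omega), htbl]
      have h1 : M = l.length + 1 := by omega
      have h2 : M' = l.length + 2 := by omega
      have hz : fj (l.length + 1) = ((0 : Int), (0 : Int)) := by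
        simp [hf, pvCnt_of_len_lt l (l.length + 1) false (by omega),
          pvCnt_of_len_lt l (l.length + 1) true (by omega)]
      rw [h1, h2]
      symm
      rw [show l.length + 2 = (l.length + 1) + 1 from rfl, List.range_succ, List.map_append]
      simp [hz]
    · rw [if_neg (by push_cast; omega), htbl]
      have h12 : M = M' := by omega
      rw [h12]
  have hRHS : pvTbl k (l ++ [x]) = (List.range M').map Fj := by
    unfold pvTbl
    rw [show (l ++ [x]).length + 1 = l.length + 2 by simp]
  obtain ⟨m, hm⟩ : ∃ m, M' = m + 1 := ⟨M' - 1, by omega⟩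
  simp only [pvStep]
  rw [hprev, hext, hRHS, hm, List.range_succ_eq_map, List.map_cons, List.map_cons,
    List.map_map, List.map_map, List.take_succ_cons, List.take_zero, List.drop_succ_cons, List.drop_zero,
    pvZipWith_map_range]
  have hmM : min m M = m := by omega
  rw [hmM]
  have hhead : fj 0 = Fj 0 := by
    simp [hf, hF, pvCnt_snoc_zero]
  rw [List.singleton_append, hhead]
  congr 1
  apply List.map_congr_left
  intro j hj
  have e1 := pvCnt_snoc x l j false
  have e2 := pvCnt_snoc x l j true
  simp only [Function.comp, hf, hF, hpx, e1, e2, Nat.succ_eq_add_one]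
  push_cast
  rfl

lemma pvFold_tbl (k : Nat) : ∀ (xs l : List Int),
    xs.foldl (pvStep (k : Int)) (pvTbl k l) = pvTbl k (l ++ xs) := by
  intro xs
  induction xs with
  | nil => intro l; simp
  | cons x xs ih =>
      intro l
      simp only [List.foldl_cons]
      rw [pvStep_tbl, ih]
      simp [List.append_assoc]

lemma pvTbl_nil (k : Nat) : pvTbl k [] = [((1 : Int), (0 : Int))] := by
  simp [pvTbl, List.range_succ, pvCnt_zero]

lemma pvCounter_eq (L : List (List Int)) : ∀ (c : Int),
    L.foldl (fun c ss => if PySem.Int.mod ss.sum 2 ≠ 0 then c + 1 else c) c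
      = c + (L.countP (fun ss => pvPar ss.sum == true) : Int) := by
  induction L with
  | nil => intro c; simp
  | cons ss L ih =>
      intro c
      simp only [List.foldl_cons, List.countP_cons]
      have hm : PySem.Int.mod ss.sum 2 = ss.sum % 2 :=
        PySem.Int.mod_eq_emod_of_pos (by norm_num)
      have h2 := Int.emod_two_eq ss.sum
      by_cases h : ss.sum % 2 = 1
      · rw [if_pos (by rw [hm, h]; norm_num), ih]
        simp [pvPar, h]; ring
      · have h0 : ss.sum % 2 = 0 := by omega
        rw [if_neg (by rw [hm]; omega), ih]
        simp [pvPar, h0]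

-- ===== VERDICT (by name: the statement is the Claim_ definition above) =====
theorem f_spec : Claim_equal_f := by
  intro n k _ hk
  obtain ⟨m, rfl⟩ : ∃ m : Nat, k = (m : Int) := ⟨k.toNat, (Int.toNat_of_nonneg hk).symm⟩
  unfold Spec_f f f_alt
  set l := PySem.List.pyRange 1 (n + 1) 1 with hl
  have hlen : l.length = n.toNat := by
    rw [hl, PySem.List.length_pyRange_one]
    omega
  by_cases hnk : n < (m : Int)
  · -- k exceeds n: B exits early with 0; A's combination list is empty (or the sum is even)
    rw [if_pos (Or.inr hnk)]
    have hc0 : pvCnt l m true = 0 := by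
      cases m with
      | zero => rw [pvCnt_zero]; rfl
      | succ s => exact pvCnt_of_len_lt l (s + 1) true (by omega)
    have hcounter : (pvCombinations (m : Int).toNat l).foldl
        (fun c ss => if PySem.Int.mod ss.sum 2 ≠ 0 then c + 1 else c) (0 : Int) = 0 := by
      rw [pvCombinations_eq, pvCounter_eq]
      simp only [pvCnt] at hc0
      rw [show ((m : Int)).toNat = m from Int.toNat_natCast m, hc0]
      simp
    simp only [hcounter]
    norm_num [PySem.Int.mod]
  rw [if_neg (by omega : ¬ ((m : Int) < 0 ∨ n < (m : Int)))]
  have hfold : l.foldl (pvStep (m : Int)) [((1 : Int), (0 : Int))] = pvTbl m l := by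
    have h0 := pvFold_tbl m l []
    simpa [pvTbl_nil] using h0
  have hcounter : (pvCombinations (m : Int).toNat l).foldl
      (fun c ss => if PySem.Int.mod ss.sum 2 ≠ 0 then c + 1 else c) (0 : Int)
      = (pvCnt l m true : Int) := by
    rw [pvCombinations_eq, pvCounter_eq]
    simp [pvCnt]
  simp only [hfold, hcounter]
  have hml : m ≤ l.length := by omega
  have hlt : ((m : Int)) < ((pvTbl m l).length : Int) := by
    rw [pvTbl_len]; push_cast; omega
  rw [if_pos hlt]
  have hget : (pvTbl m l).getD (m : Int).toNat ((0 : Int), (0 : Int))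
      = ((pvCnt l m false : Int), (pvCnt l m true : Int)) := by
    rw [List.getD_eq_getElem _ _ (by rw [pvTbl_len]; simp; omega)]
    simp [pvTbl]
  rw [hget]
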